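-- pv_equiv track=rewrite | github.com/RODZAKI/rodzaki-quasantum | tools/analyze_drawers.py | drawer_distribution
-- ===== SOURCE A (Python) =====
-- DRAWERS = [
--     "dharma", "logos", "maat",
--     "dao", "rta", "ayni",
--     "ubuntu", "mitakuye-oyasin", "sumak-kawsay"
-- ]
--
-- def drawer_distribution(artifacts):
--     counts = {d: 0 for d in DRAWERS}
--     for a in artifacts:
--         weights = a.get("drawer_weights", {})
--         for drawer in DRAWERS:
--             if weights.get(drawer, 0) > 0:
--                 counts[drawer] += 1
--     return counts
-- ===== SOURCE B (Python) =====
-- DRAWERS = [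
--     "dharma", "logos", "maat",
--     "dao", "rta", "ayni",
--     "ubuntu", "mitakuye-oyasin", "sumak-kawsay"
-- ]
--
-- DRAWER_SET = set(DRAWERS)
--
-- def drawer_distribution(artifacts):
--     # Tally pass: walk only the entries each artifact actually carries
--     # (guarding membership before positivity), then assemble the result
--     # over DRAWERS from the tally.
--     tally = {}
--     for a in artifacts:
--         for drawer, w in a.get("drawer_weights", {}).items():
--             if drawer in DRAWER_SET and w > 0:
--                 tally[drawer] = tally.get(drawer, 0) + 1
--     return {d: tally.get(d, 0) for d in DRAWERS}
-- ===== Notes on version B (the rewrite author's own statement) =====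
-- stated objective: alternative
-- what changed: Instead of scanning the fixed 9-drawer list for every artifact, B walks only the entries each artifact's own weights dict carries, tallying hits into a dict guarded by a set-membership test, and assembles the counts over DRAWERS at the end; Pre_ excludes association lists whose inner weight dicts carry duplicate keys, which no Python dict input can realize (the assoc-list encoding is ambiguous there: A reads the first match, B iterates every entry).
import Mathlib
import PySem

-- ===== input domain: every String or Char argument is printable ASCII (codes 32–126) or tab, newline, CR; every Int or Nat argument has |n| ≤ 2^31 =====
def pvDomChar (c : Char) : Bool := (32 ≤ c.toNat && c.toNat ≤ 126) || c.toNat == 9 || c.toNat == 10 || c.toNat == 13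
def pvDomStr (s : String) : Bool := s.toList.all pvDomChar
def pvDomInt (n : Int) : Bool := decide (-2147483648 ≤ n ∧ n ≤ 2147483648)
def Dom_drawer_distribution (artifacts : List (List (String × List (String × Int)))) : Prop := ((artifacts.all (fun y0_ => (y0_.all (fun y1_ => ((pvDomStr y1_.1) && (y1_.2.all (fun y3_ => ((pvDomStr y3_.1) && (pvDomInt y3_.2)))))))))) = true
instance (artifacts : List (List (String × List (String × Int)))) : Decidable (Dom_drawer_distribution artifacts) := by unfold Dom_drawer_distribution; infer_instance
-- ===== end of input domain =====

-- B replaces A's per-artifact scan of the fixed 9-drawer list by a tally pass over the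
-- entries each artifact's own weights dict actually carries (set-membership guard, tally
-- dict), assembling the counts over DRAWERS afterwards; objective: alternative algorithm.

def DRAWERS : List String :=
  ["dharma", "logos", "maat", "dao", "rta", "ayni", "ubuntu", "mitakuye-oyasin", "sumak-kawsay"]

-- ===== PORT A =====
def drawer_distribution (artifacts : List (List (String × List (String × Int)))) : List (String × Int) :=
  (artifacts.foldl (fun counts a =>
      DRAWERS.foldl (fun counts drawer =>
        if (PySem.Dict.mk ((PySem.Dict.mk a).getD "drawer_weights" [])).getD drawer 0 > 0 then
          counts.insert drawer (counts.getD drawer 0 + 1)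
        else counts) counts)
    (DRAWERS.foldl (fun (c : PySem.Dict String Int) d => c.insert d 0) PySem.Dict.empty)).items

-- ===== PORT B =====
def DRAWER_SET : PySem.Set String := PySem.Set.ofList DRAWERS

def drawer_distribution_alt (artifacts : List (List (String × List (String × Int)))) : List (String × Int) :=
  let tally : PySem.Dict String Int :=
    artifacts.foldl (fun tally a =>
      ((PySem.Dict.mk a).getD "drawer_weights" []).foldl (fun tally p =>
        if DRAWER_SET.contains p.1 ∧ p.2 > 0 then
          tally.insert p.1 (tally.getD p.1 0 + 1)
        else tally) tally)
    PySem.Dict.empty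
  DRAWERS.map (fun d => (d, tally.getD d 0))

-- ===== PRECONDITION & SPEC =====
-- Pre_ excludes association lists in which some artifact's inner weights dict carries a
-- duplicate key: no Python dict input can realize those lists, and the encoding is
-- ambiguous there (A reads the first match, B iterates every entry).
def Pre_drawer_distribution (artifacts : List (List (String × List (String × Int)))) : Prop :=
  ∀ a ∈ artifacts, ∀ p ∈ a, (p.2.map Prod.fst).Nodup
instance (artifacts : List (List (String × List (String × Int)))) : Decidable (Pre_drawer_distribution artifacts) := by unfold Pre_drawer_distribution; infer_instance
def pvWitness_drawer_distribution : (List (List (String × List (String × Int)))) :=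
  [[("drawer_weights", [("dharma", 2), ("x", -1)])], [("name", [])]]
def Spec_drawer_distribution (artifacts : List (List (String × List (String × Int)))) (out : List (String × Int)) : Prop := out = drawer_distribution_alt artifacts
instance (artifacts : List (List (String × List (String × Int)))) (out : List (String × Int)) : Decidable (Spec_drawer_distribution artifacts out) := by unfold Spec_drawer_distribution; infer_instance

-- ===== CLAIM (what is proved, stated in full; the proofs are below) =====
def Claim_equal_drawer_distribution : Prop := ∀ (artifacts : List (List (String × List (String × Int)))), Dom_drawer_distribution artifacts → Pre_drawer_distribution artifacts → Spec_drawer_distribution artifacts (drawer_distribution artifacts)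

-- ===== LEMMAS AND PROOFS =====

-- A's counts dict always has shape: DRAWERS, each paired with its current count
def mkdict (f : String → Int) : PySem.Dict String Int :=
  PySem.Dict.mk (DRAWERS.map (fun d => (d, f d)))

theorem mkdict_congr {f g : String → Int} (h : ∀ d ∈ DRAWERS, f d = g d) :
    mkdict f = mkdict g := by
  unfold mkdict
  exact congrArg PySem.Dict.mk (List.map_congr_left (fun d hd => by rw [h d hd]))

theorem nodup_DRAWERS : DRAWERS.Nodup := by decide

theorem keys_mkdict (f : String → Int) : (mkdict f).keys = DRAWERS := by
  unfold mkdict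
  rw [PySem.Dict.keys_mk, List.map_map]
  exact (List.map_congr_left fun d _ => rfl).trans (List.map_id _)

theorem getD_mkdict (f : String → Int) {k : String} (hk : k ∈ DRAWERS) :
    (mkdict f).getD k 0 = f k := by
  apply PySem.Dict.getD_of_mem_items
  · exact List.mem_map_of_mem hk
  · rw [keys_mkdict]; exact nodup_DRAWERS

theorem insert_mkdict (f : String → Int) {k : String} (hk : k ∈ DRAWERS) (v : Int) :
    (mkdict f).insert k v = mkdict (fun d => if d = k then v else f d) := by
  apply PySem.Dict.ext
  have hc : (mkdict f).contains k := by
    rw [PySem.Dict.contains_iff_mem_keys, keys_mkdict]; exact hk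
  rw [PySem.Dict.items_insert, if_pos hc]
  show (DRAWERS.map (fun d => (d, f d))).map (fun p => if p.1 == k then (k, v) else p)
      = DRAWERS.map (fun d => (d, if d = k then v else f d))
  rw [List.map_map]
  refine List.map_congr_left (fun d _ => ?_)
  by_cases h : d = k <;> simp [h]

-- one inner loop of A (over DRAWERS), for a fixed weights dict w
theorem inner_fold (w : PySem.Dict String Int) (ds : List String) (f : String → Int)
    (hsub : ∀ d ∈ ds, d ∈ DRAWERS) (hnd : ds.Nodup) :
    ds.foldl (fun counts drawer =>
        if w.getD drawer 0 > 0 then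
          counts.insert drawer (counts.getD drawer 0 + 1)
        else counts) (mkdict f)
      = mkdict (fun d => if d ∈ ds ∧ w.getD d 0 > 0 then f d + 1 else f d) := by
  induction ds generalizing f with
  | nil => simp
  | cons a ds ih =>
    have ha : a ∈ DRAWERS := hsub a (List.mem_cons_self ..)
    have hds : ∀ d ∈ ds, d ∈ DRAWERS := fun d hd => hsub d (List.mem_cons_of_mem _ hd)
    have hnd' : ds.Nodup := hnd.of_cons
    have hna : a ∉ ds := by
      intro h; exact (List.nodup_cons.mp hnd).1 h
    rw [List.foldl_cons]
    by_cases hp : w.getD a 0 > 0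
    · rw [if_pos hp, getD_mkdict f ha, insert_mkdict f ha, ih _ hds hnd']
      apply mkdict_congr
      intro d _
      by_cases hda : d = a
      · subst hda
        simp [hna, hp]
      · by_cases hdm : d ∈ ds <;> simp [hda, hdm]
    · rw [if_neg hp, ih f hds hnd']
      apply mkdict_congr
      intro d _
      by_cases hda : d = a
      · subst hda; simp [hp]
      · simp [hda]

-- shift lemma for the counting fold
theorem count_fold_shift {α : Type} (p : α → Prop) [DecidablePred p] (xs : List α) (s : Int) :
    xs.foldl (fun s a => if p a then s + 1 else s) s
      = s + xs.foldl (fun s a => if p a then s + 1 else s) 0 := by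
  induction xs generalizing s with
  | nil => simp
  | cons a xs ih =>
    simp only [List.foldl_cons]
    by_cases hp : p a
    · rw [if_pos hp, if_pos hp, ih (s + 1), ih (0 + 1)]; ring
    · rw [if_neg hp, if_neg hp, ih s]

abbrev hit (a : List (String × List (String × Int))) (d : String) : Prop :=
  (PySem.Dict.mk ((PySem.Dict.mk a).getD "drawer_weights" [])).getD d 0 > 0

def cnt (arts : List (List (String × List (String × Int)))) (d : String) : Int :=
  arts.foldl (fun s a => if hit a d then s + 1 else s) 0

theorem cnt_cons (a : List (String × List (String × Int)))
    (arts : List (List (String × List (String × Int)))) (d : String) :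
    cnt (a :: arts) d = (if hit a d then 1 else 0) + cnt arts d := by
  unfold cnt
  rw [List.foldl_cons]
  by_cases hp : hit a d
  · rw [if_pos hp, if_pos hp, count_fold_shift (hit · d)]; ring
  · rw [if_neg hp, if_neg hp]; simp

-- the outer loop of A, from any counts state of shape mkdict f
theorem outer_fold (arts : List (List (String × List (String × Int)))) (f : String → Int) :
    arts.foldl (fun counts a =>
        DRAWERS.foldl (fun counts drawer =>
          if (PySem.Dict.mk ((PySem.Dict.mk a).getD "drawer_weights" [])).getD drawer 0 > 0 then
            counts.insert drawer (counts.getD drawer 0 + 1)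
          else counts) counts) (mkdict f)
      = mkdict (fun d => f d + cnt arts d) := by
  induction arts generalizing f with
  | nil => simp [cnt]
  | cons a arts ih =>
    rw [List.foldl_cons]
    show arts.foldl _ (DRAWERS.foldl _ (mkdict f)) = _
    rw [inner_fold (PySem.Dict.mk ((PySem.Dict.mk a).getD "drawer_weights" []))
          DRAWERS f (fun _ h => h) nodup_DRAWERS, ih]
    apply mkdict_congr
    intro d hd
    rw [cnt_cons]
    show (if d ∈ DRAWERS ∧ hit a d then f d + 1 else f d) + cnt arts d
        = f d + ((if hit a d then 1 else 0) + cnt arts d)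
    by_cases hp : hit a d
    · rw [if_pos (⟨hd, hp⟩ : d ∈ DRAWERS ∧ hit a d), if_pos hp]; ring
    · rw [if_neg (fun h => hp h.2), if_neg hp]; ring

theorem init_counts :
    DRAWERS.foldl (fun (c : PySem.Dict String Int) d => c.insert d 0) PySem.Dict.empty
      = mkdict (fun _ => 0) := by decide

-- ===== B-side lemmas =====

theorem contains_DRAWER_SET {d : String} (h : d ∈ DRAWERS) : DRAWER_SET.contains d = true := by
  simp [DRAWER_SET, PySem.Set.contains]; exact h

theorem getD_mk_cons (k d : String) (v : Int) (rest : List (String × Int)) :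
    (PySem.Dict.mk ((k, v) :: rest)).getD d 0
      = if k = d then v else (PySem.Dict.mk rest).getD d 0 := by
  simp only [PySem.Dict.getD_eq_get?_getD, PySem.Dict.get?_mk_cons, beq_iff_eq]
  split <;> simp

theorem getD_mk_zero_of_not_mem (rest : List (String × Int)) {d : String}
    (h : d ∉ rest.map Prod.fst) : (PySem.Dict.mk rest).getD d 0 = 0 := by
  apply PySem.Dict.getD_of_not_contains
  simp only [PySem.Dict.contains_mk]
  simp only [List.any_eq_false, beq_iff_eq]
  intro p hp e
  exact h (e ▸ List.mem_map_of_mem hp)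

-- one inner tally loop of B (over a weights list with distinct keys)
theorem inner_tally (w : List (String × Int)) (hn : (w.map Prod.fst).Nodup)
    (t : PySem.Dict String Int) (d : String) (hd : d ∈ DRAWERS) :
    (w.foldl (fun tally p =>
        if DRAWER_SET.contains p.1 ∧ p.2 > 0 then
          tally.insert p.1 (tally.getD p.1 0 + 1)
        else tally) t).getD d 0
      = t.getD d 0 + (if (PySem.Dict.mk w).getD d 0 > 0 then 1 else 0) := by
  induction w generalizing t with
  | nil =>
    rw [List.foldl_nil, getD_mk_zero_of_not_mem [] (by simp)]
    simp
  | cons p rest ih =>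
    obtain ⟨k, v⟩ := p
    have hn' : (rest.map Prod.fst).Nodup := (List.nodup_cons.mp hn).2
    have hk : k ∉ rest.map Prod.fst := (List.nodup_cons.mp hn).1
    rw [List.foldl_cons, ih hn', getD_mk_cons]
    by_cases hkd : k = d
    · subst hkd
      rw [if_pos rfl, getD_mk_zero_of_not_mem rest hk, if_neg (by omega : ¬ (0 : Int) > 0)]
      by_cases hv : v > 0
      · rw [if_pos hv]
        show (if DRAWER_SET.contains k ∧ v > 0 then t.insert k (t.getD k 0 + 1) else t).getD k 0 + 0
            = t.getD k 0 + 1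
        rw [if_pos ⟨by rw [contains_DRAWER_SET hd], hv⟩, PySem.Dict.getD_insert_self]
        omega
      · rw [if_neg hv]
        show (if DRAWER_SET.contains k ∧ v > 0 then t.insert k (t.getD k 0 + 1) else t).getD k 0 + 0
            = t.getD k 0 + 0
        rw [if_neg (fun h => hv h.2)]
    · rw [if_neg hkd]
      congr 1
      show (if DRAWER_SET.contains k ∧ v > 0 then t.insert k (t.getD k 0 + 1) else t).getD d 0
          = t.getD d 0
      by_cases hc : DRAWER_SET.contains k ∧ v > 0
      · rw [if_pos hc, PySem.Dict.getD_insert, if_neg (fun e => hkd e.symm)]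
      · rw [if_neg hc]

-- the outer tally loop of B
theorem outer_tally (arts : List (List (String × List (String × Int))))
    (hpre : ∀ a ∈ arts, ∀ p ∈ a, (p.2.map Prod.fst).Nodup)
    (t : PySem.Dict String Int) (d : String) (hd : d ∈ DRAWERS) :
    (arts.foldl (fun tally a =>
        ((PySem.Dict.mk a).getD "drawer_weights" []).foldl (fun tally p =>
          if DRAWER_SET.contains p.1 ∧ p.2 > 0 then
            tally.insert p.1 (tally.getD p.1 0 + 1)
          else tally) tally) t).getD d 0
      = t.getD d 0 + cnt arts d := by
  induction arts generalizing t with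
  | nil => simp [cnt]
  | cons a arts ih =>
    have hw : (((PySem.Dict.mk a).getD "drawer_weights" []).map Prod.fst).Nodup := by
      rcases h : (PySem.Dict.mk a).get? "drawer_weights" with _ | w
      · rw [PySem.Dict.getD_of_get?_eq_none _ _ h]; simp
      · rw [PySem.Dict.getD_of_get?_eq_some _ _ h]
        have := PySem.Dict.mem_items_of_get?_eq_some _ h
        exact hpre a (List.mem_cons_self ..) _ this
    rw [List.foldl_cons, ih (fun a ha => hpre a (List.mem_cons_of_mem _ ha)),
        inner_tally _ hw t d hd, cnt_cons]
    show t.getD d 0 + (if hit a d then 1 else 0) + cnt arts d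
        = t.getD d 0 + ((if hit a d then 1 else 0) + cnt arts d)
    ring

-- ===== VERDICT (by name: the statement is the Claim_ definition above) =====
theorem drawer_distribution_spec : Claim_equal_drawer_distribution := by
  intro artifacts _ hpre
  unfold Spec_drawer_distribution drawer_distribution drawer_distribution_alt
  rw [init_counts, outer_fold]
  show (mkdict _).items = DRAWERS.map _
  unfold mkdict
  refine List.map_congr_left (fun d hd => ?_)
  rw [outer_tally artifacts hpre PySem.Dict.empty d hd]
  simp [cnt]
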